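-- pv_equiv track=rewrite | github.com/Joker7822/num4 | numbers4_predictor.py | evaluate_self_predictions
-- ===== SOURCE A (Python) =====
-- from collections import Counter
--
-- NUM_DIGITS = 4
--
-- def count_digit_matches(pred, actual):
--     """Numbers4用: 並びを無視した一致数を multiset（重複を考慮）で数える（最大4）。"""
--     pred = list(map(int, pred))
--     actual = list(map(int, actual))
--     cp, ca = Counter(pred), Counter(actual)
--     return sum(min(cp[d], ca[d]) for d in (cp.keys() | ca.keys()))
--
-- def evaluate_self_predictions(self_predictions, true_data):
--     """予測と実データの一致数（並び無視・重複考慮）を返す。"""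
--     scores = []
--     for pred in self_predictions:
--         best_match = 0
--         for actual in true_data:
--             best_match = max(best_match, count_digit_matches(pred, actual))
--             if best_match == NUM_DIGITS:
--                 break
--         scores.append(best_match)
--     return scores
-- ===== SOURCE B (Python) =====
-- NUM_DIGITS = 4
--
-- def _overlap(xs, ys):
--     """Size of the multiset intersection of two ascending-sorted int lists."""
--     i = j = c = 0
--     while i < len(xs) and j < len(ys):
--         if xs[i] == ys[j]:
--             c += 1
--             i += 1
--             j += 1
--         elif xs[i] < ys[j]:
--             i += 1
--         else:
--             j += 1
--     return c
--
-- def evaluate_self_predictions(self_predictions, true_data):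
--     actuals = [sorted(map(int, a)) for a in true_data]
--     scores = []
--     for pred in self_predictions:
--         p = sorted(map(int, pred))
--         best = 0
--         for a in actuals:
--             best = max(best, _overlap(p, a))
--             if best == NUM_DIGITS:  # perfect match, stop early
--                 break
--         scores.append(best)
--     return scores
-- ===== Notes on version B (the rewrite author's own statement) =====
-- stated objective: faster
-- what changed: B sorts every row once and computes each multiset-overlap with a two-pointer merge of the two sorted lists instead of building two hash Counters and a key-set union per (prediction, actual) pair; the best-score loop with its early exit at a perfect NUM_DIGITS match is kept.
import Mathlib
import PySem

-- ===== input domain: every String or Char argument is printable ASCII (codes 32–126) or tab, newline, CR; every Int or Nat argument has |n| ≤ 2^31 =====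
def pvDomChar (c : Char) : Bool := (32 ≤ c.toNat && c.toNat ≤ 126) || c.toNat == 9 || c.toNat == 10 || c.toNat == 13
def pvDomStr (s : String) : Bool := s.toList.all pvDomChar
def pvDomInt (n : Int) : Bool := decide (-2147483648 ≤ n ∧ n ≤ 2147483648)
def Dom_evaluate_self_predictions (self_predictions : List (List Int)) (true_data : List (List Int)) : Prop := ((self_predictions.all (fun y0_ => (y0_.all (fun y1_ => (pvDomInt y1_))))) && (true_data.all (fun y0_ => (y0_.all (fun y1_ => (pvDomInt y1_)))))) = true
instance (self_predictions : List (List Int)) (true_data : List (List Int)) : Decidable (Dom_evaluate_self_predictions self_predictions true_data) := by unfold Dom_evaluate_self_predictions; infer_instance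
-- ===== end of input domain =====

-- B sorts every row once and counts each multiset overlap with a two-pointer merge of the two
-- sorted lists instead of A's two hash Counters plus key-set union per pair; measured faster by
-- a constant factor.

-- ===== PORT A =====
-- Counter(xs)[d] is PySem.Dict.counter / getD; cp.keys() | ca.keys() is PySem.Set.union of the
-- two key lists; Python iterates that set in unspecified hash order, but the sum of ints does
-- not depend on the order, so the fold runs in the set's insertion order. list(map(int, xs)) is
-- the identity on a list of ints and is dropped.
def count_digit_matches (pred actual : List Int) : Int :=
  let cp := PySem.Dict.counter pred
  let ca := PySem.Dict.counter actual
  let keys := PySem.Set.union cp.keys ca.keys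
  keys.foldl (fun s d => s + min (cp.getD d 0) (ca.getD d 0)) 0

-- the inner 'for actual in true_data' loop with its 'break' at best_match == 4
def pvBestLoop (pred : List Int) : List (List Int) → Int → Int
  | [], best => best
  | actual :: rest, best =>
    let best' := max best (count_digit_matches pred actual)
    if best' == 4 then best' else pvBestLoop pred rest best'

def evaluate_self_predictions (self_predictions : List (List Int)) (true_data : List (List Int)) : List Int :=
  self_predictions.foldl (fun scores pred => scores ++ [pvBestLoop pred true_data 0]) []

-- ===== PORT B =====
-- two-pointer merge over two ascending-sorted lists (_overlap in Source B)
def pvOverlap : List Int → List Int → Int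
  | x :: xs, y :: ys =>
    if x == y then 1 + pvOverlap xs ys
    else if x < y then pvOverlap xs (y :: ys)
    else pvOverlap (x :: xs) ys
  | _, [] => 0
  | [], _ => 0
termination_by xs ys => xs.length + ys.length

-- Source B's 'for a in actuals' loop with its early exit at best == NUM_DIGITS (= 4)
def pvAltLoop (p : List Int) : List (List Int) → Int → Int
  | [], best => best
  | a :: rest, best =>
    let best' := max best (pvOverlap p a)
    if best' == 4 then best' else pvAltLoop p rest best'

def evaluate_self_predictions_alt (self_predictions : List (List Int)) (true_data : List (List Int)) : List Int :=
  let actuals := true_data.map (fun a => PySem.List.sorted a (fun x => x))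
  self_predictions.map (fun pred => pvAltLoop (PySem.List.sorted pred (fun x => x)) actuals 0)

-- ===== PRECONDITION & SPEC =====
def Spec_evaluate_self_predictions (self_predictions : List (List Int)) (true_data : List (List Int)) (out : List Int) : Prop := out = evaluate_self_predictions_alt self_predictions true_data
instance (self_predictions : List (List Int)) (true_data : List (List Int)) (out : List Int) : Decidable (Spec_evaluate_self_predictions self_predictions true_data out) := by unfold Spec_evaluate_self_predictions; infer_instance

-- ===== CLAIM (what is proved, stated in full; the proofs are below) =====
def Claim_equal_evaluate_self_predictions : Prop := ∀ (self_predictions : List (List Int)) (true_data : List (List Int)), Dom_evaluate_self_predictions self_predictions true_data → Spec_evaluate_self_predictions self_predictions true_data (evaluate_self_predictions self_predictions true_data)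

-- ===== LEMMAS AND PROOFS =====

-- Σ_{d ∈ keys} min(count d xs, count d ys) = |xs ∩ ys| as multisets, for any nodup key list
-- covering the elements of xs and ys.
lemma sum_min_counts (keys xs ys : List Int) (hnd : keys.Nodup)
    (hx : ∀ d, d ∈ xs → d ∈ keys) (_hy : ∀ d, d ∈ ys → d ∈ keys) :
    (keys.map (fun d => (min (xs.count d) (ys.count d) : Nat))).sum
      = (Multiset.ofList xs ∩ Multiset.ofList ys).card := by
  have hcnt : ∀ d : Int, (min (xs.count d) (ys.count d) : Nat)
      = (Multiset.ofList xs ∩ Multiset.ofList ys).count d := by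
    intro d; rw [Multiset.count_inter]; simp
  rw [← List.sum_toFinset _ hnd, ← Multiset.toFinset_sum_count_eq]
  simp only [hcnt]
  symm
  apply Finset.sum_subset
  · intro d hd
    rw [Multiset.mem_toFinset, Multiset.mem_inter] at hd
    simp only [List.mem_toFinset]
    exact hx d (by simpa using hd.1)
  · intro d _ hd
    rw [Multiset.mem_toFinset] at hd
    exact Multiset.count_eq_zero.mpr hd

lemma cdm_card (pred a : List Int) :
    count_digit_matches pred a = ((Multiset.ofList pred ∩ Multiset.ofList a).card : Int) := by
  unfold count_digit_matches
  rw [PySem.List.foldl_add, zero_add, PySem.Dict.keys_counter, PySem.Dict.keys_counter]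
  have h1 : (PySem.Set.union (PySem.Set.ofList pred) (PySem.Set.ofList a)).map
        (fun d => min ((PySem.Dict.counter pred).getD d 0) ((PySem.Dict.counter a).getD d 0))
      = ((PySem.Set.union (PySem.Set.ofList pred) (PySem.Set.ofList a)).map
        (fun d => (min (pred.count d) (a.count d) : Nat))).map (Nat.cast : Nat → Int) := by
    rw [List.map_map]
    apply List.map_congr_left
    intro d _
    simp [PySem.Dict.getD_counter, Function.comp, Nat.cast_min]
  rw [h1, ← Nat.cast_list_sum,
    sum_min_counts _ _ _
      (PySem.Set.nodup_union _ _ (PySem.Set.nodup_ofList pred))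
      (fun d hd => (PySem.Set.mem_union _ _ d).mpr (Or.inl ((PySem.Set.mem_ofList _ _).mpr hd)))
      (fun d hd => (PySem.Set.mem_union _ _ d).mpr (Or.inr ((PySem.Set.mem_ofList _ _).mpr hd)))]

lemma overlap_card : ∀ (n : Nat) (xs ys : List Int), xs.length + ys.length ≤ n →
    xs.Pairwise (· ≤ ·) → ys.Pairwise (· ≤ ·) →
    pvOverlap xs ys = ((Multiset.ofList xs ∩ Multiset.ofList ys).card : Int) := by
  intro n
  induction n with
  | zero =>
    intro xs ys h _ _
    have hx : xs = [] := List.length_eq_zero_iff.mp (by omega)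
    have hy : ys = [] := List.length_eq_zero_iff.mp (by omega)
    subst hx; subst hy; simp [pvOverlap]
  | succ n ih =>
    intro xs ys h hxs hys
    match xs, ys with
    | [], ys => cases ys <;> simp [pvOverlap]
    | x :: xs, [] => simp [pvOverlap]
    | x :: xs, y :: ys =>
      simp only [pvOverlap]
      by_cases hxy : x = y
      · subst hxy
        rw [if_pos (by simp)]
        have : (Multiset.ofList (x :: xs)) ∩ (Multiset.ofList (x :: ys))
            = x ::ₘ (Multiset.ofList xs ∩ Multiset.ofList ys) := by
          rw [show (Multiset.ofList (x :: xs)) = x ::ₘ Multiset.ofList xs from rfl,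
              show (Multiset.ofList (x :: ys)) = x ::ₘ Multiset.ofList ys from rfl,
              Multiset.cons_inter_of_pos _ (Multiset.mem_cons_self x _),
              Multiset.erase_cons_head]
        rw [this, Multiset.card_cons,
          ih xs ys (by simp at h ⊢; omega) hxs.of_cons hys.of_cons]
        push_cast; ring
      · by_cases hlt : x < y
        · rw [if_neg (by simpa using hxy), if_pos (by simpa using hlt)]
          have hnm : x ∉ (Multiset.ofList (y :: ys)) := by
            simp only [Multiset.mem_coe, List.mem_cons]
            rintro (rfl | hmem)
            · exact hxy rfl
            · have := (List.pairwise_cons.mp hys).1 x hmem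
              omega
          have : (Multiset.ofList (x :: xs)) ∩ (Multiset.ofList (y :: ys))
              = Multiset.ofList xs ∩ Multiset.ofList (y :: ys) := by
            rw [show (Multiset.ofList (x :: xs)) = x ::ₘ Multiset.ofList xs from rfl,
              Multiset.cons_inter_of_neg _ hnm]
          rw [this]
          exact ih xs (y :: ys) (by simp at h ⊢; omega) hxs.of_cons hys
        · rw [if_neg (by simpa using hxy), if_neg (by simpa using hlt)]
          have hyx : y < x := by
            rcases lt_trichotomy x y with h' | h' | h'
            · exact absurd h' hlt
            · exact absurd h' hxy
            · exact h'
          have hnm : y ∉ (Multiset.ofList (x :: xs)) := by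
            simp only [Multiset.mem_coe, List.mem_cons]
            rintro (rfl | hmem)
            · exact hxy rfl
            · have := (List.pairwise_cons.mp hxs).1 y hmem
              omega
          have : (Multiset.ofList (x :: xs)) ∩ (Multiset.ofList (y :: ys))
              = Multiset.ofList (x :: xs) ∩ Multiset.ofList ys := by
            rw [show (Multiset.ofList (y :: ys)) = y ::ₘ Multiset.ofList ys from rfl,
              Multiset.inter_comm, Multiset.cons_inter_of_neg _ hnm, Multiset.inter_comm]
          rw [this]
          exact ih (x :: xs) ys (by simp at h ⊢; omega) hxs hys.of_cons

-- the two match functions agree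
lemma overlap_eq_cdm (pred a : List Int) :
    pvOverlap (PySem.List.sorted pred (fun x => x)) (PySem.List.sorted a (fun x => x))
      = count_digit_matches pred a := by
  rw [overlap_card ((PySem.List.sorted pred (fun x => x)).length
        + (PySem.List.sorted a (fun x => x)).length) _ _ le_rfl
      (PySem.List.sorted_pairwise pred (fun x => x))
      (PySem.List.sorted_pairwise a (fun x => x)),
    cdm_card]
  congr 1
  rw [Multiset.coe_eq_coe.mpr (PySem.List.sorted_perm pred _ _),
    Multiset.coe_eq_coe.mpr (PySem.List.sorted_perm a _ _)]

-- the two best-score loops agree state for state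
lemma loop_eq (pred : List Int) : ∀ (td : List (List Int)) (b : Int),
    pvAltLoop (PySem.List.sorted pred (fun x => x)) (td.map (fun a => PySem.List.sorted a (fun x => x))) b
      = pvBestLoop pred td b := by
  intro td
  induction td with
  | nil => intro b; rfl
  | cons a rest ih =>
    intro b
    simp only [List.map_cons, pvAltLoop, pvBestLoop, overlap_eq_cdm pred a]
    split_ifs with h
    · rfl
    · exact ih _

-- ===== VERDICT (by name: the statement is the Claim_ definition above) =====
theorem evaluate_self_predictions_spec : Claim_equal_evaluate_self_predictions := by
  intro sp td _
  show evaluate_self_predictions sp td = evaluate_self_predictions_alt sp td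
  unfold evaluate_self_predictions evaluate_self_predictions_alt
  rw [PySem.List.foldl_append_singleton_eq_map, List.nil_append]
  apply List.map_congr_left
  intro pred _
  exact (loop_eq pred td 0).symm
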